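-- pv_equiv track=rewrite | github.com/thaisblt/gestion-laboratoire | laboratoire.py | occupation_bureau_html
-- ===== SOURCE A (Python) =====
-- def occupation_bureau_html(labo) :
--     """ Afficher l'occupation des bureaux sous la forme d'une page HTML. Retourne une liste du contenu de la page HTML """
--     # Récupérer les bureaux et la liste de leurs occupants
--     dans_bureau = {}
--     for nom, bureau in labo.items() :
--         if bureau not in dans_bureau :
--             dans_bureau[bureau] = []
--         dans_bureau[bureau].append(nom)
--
--     # Construire le contenu de la page HTML
--     contenu_html = [
--         "<!DOCTYPE html>",
--         "<html>",
--         "<head>",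
--         "<title>Occupations des bureaux</title>",
--         "</head>",
--         "<body>",
--         "<h1>Occupation des bureaux</h1>"
--     ]
--     # Ajouter la liste des occupants au contenu et fermer les balises
--     for bureau, occupants in sorted(dans_bureau.items()) :
--         contenu_html.append(f"<h2>Bureau {bureau} :</h2>")
--         contenu_html.append("<ul>")
--         for occupant in sorted(occupants) :
--             contenu_html.append(f"<li>{occupant}</li>")
--         contenu_html.append("</ul>")
--     contenu_html.append("</body></html>")
--     return contenu_html
-- ===== SOURCE B (Python) =====
-- def occupation_bureau_html(labo):
--     """ Afficher l'occupation des bureaux sous la forme d'une page HTML. Retourne une liste du contenu de la page HTML """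
--     html = [
--         "<!DOCTYPE html>",
--         "<html>",
--         "<head>",
--         "<title>Occupations des bureaux</title>",
--         "</head>",
--         "<body>",
--         "<h1>Occupation des bureaux</h1>"
--     ]
--     for bureau in sorted(set(labo.values())):
--         noms = sorted(nom for nom, b in labo.items() if b == bureau)
--         html.append(f"<h2>Bureau {bureau} :</h2>")
--         html.append("<ul>")
--         html.extend(f"<li>{nom}</li>" for nom in noms)
--         html.append("</ul>")
--     html.append("</body></html>")
--     return html
-- ===== Notes on version B (the rewrite author's own statement) =====
-- stated objective: simpler
-- what changed: Replaces the dict-of-lists grouping pass followed by sorting the (bureau, occupants) items with a direct sweep over the sorted distinct office values, collecting and sorting each office's names by filtering the entries, so no intermediate dict of lists is built.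
import Mathlib
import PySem

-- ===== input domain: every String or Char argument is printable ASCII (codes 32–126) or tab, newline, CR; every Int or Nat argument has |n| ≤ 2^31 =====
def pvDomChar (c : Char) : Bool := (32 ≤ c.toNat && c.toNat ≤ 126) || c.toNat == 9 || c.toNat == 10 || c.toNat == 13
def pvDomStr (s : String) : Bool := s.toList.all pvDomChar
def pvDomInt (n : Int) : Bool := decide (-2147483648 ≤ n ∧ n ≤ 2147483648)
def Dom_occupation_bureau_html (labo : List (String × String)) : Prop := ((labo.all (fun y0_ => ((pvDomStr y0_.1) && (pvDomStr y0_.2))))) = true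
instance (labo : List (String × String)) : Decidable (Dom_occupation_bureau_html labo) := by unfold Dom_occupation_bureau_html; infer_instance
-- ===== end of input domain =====

-- B replaces A's dict-of-lists grouping + per-office sort with a single sweep over the sorted
-- distinct office values, filtering the entries per office (objective: simpler, no dict of lists).


-- ===== PORT A =====
-- labo is a Python dict (assoc list here); 'labo.items()' is (PySem.Dict.ofList labo).items.
-- 'sorted(dans_bureau.items())' compares (bureau, occupants) tuples; since dict keys are
-- distinct the bureau component never ties, so sorting by the first component is exact.
def occupation_bureau_html (labo : List (String × String)) : List String :=
  let dans_bureau : PySem.Dict String (List String) :=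
    (PySem.Dict.ofList labo).items.foldl (fun d p =>
      let d := if d.contains p.2 then d else d.insert p.2 []
      d.modify p.2 [] (fun l => l ++ [p.1])) PySem.Dict.empty
  let contenu_html : List String :=
    ["<!DOCTYPE html>", "<html>", "<head>", "<title>Occupations des bureaux</title>",
     "</head>", "<body>", "<h1>Occupation des bureaux</h1>"]
  let contenu_html :=
    (PySem.List.sorted dans_bureau.items (fun q => q.1)).foldl (fun acc q =>
      let acc := acc ++ ["<h2>Bureau " ++ q.1 ++ " :</h2>"]
      let acc := acc ++ ["<ul>"]
      let acc := (PySem.List.sorted q.2 (fun o => o)).foldl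
        (fun acc o => acc ++ ["<li>" ++ o ++ "</li>"]) acc
      acc ++ ["</ul>"]) contenu_html
  contenu_html ++ ["</body></html>"]

-- ===== PORT B =====
def occupation_bureau_html_alt (labo : List (String × String)) : List String :=
  let items := (PySem.Dict.ofList labo).items
  let html : List String :=
    ["<!DOCTYPE html>", "<html>", "<head>", "<title>Occupations des bureaux</title>",
     "</head>", "<body>", "<h1>Occupation des bureaux</h1>"]
  let html :=
    (PySem.List.sorted (PySem.Set.ofList ((PySem.Dict.ofList labo).values)) (fun b => b)).foldl
      (fun acc bureau =>
        let noms := PySem.List.sorted ((items.filter (fun p => p.2 == bureau)).map (fun p => p.1))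
          (fun n => n)
        acc ++ ["<h2>Bureau " ++ bureau ++ " :</h2>", "<ul>"]
          ++ noms.map (fun n => "<li>" ++ n ++ "</li>") ++ ["</ul>"]) html
  html ++ ["</body></html>"]

-- ===== PRECONDITION & SPEC =====
def Spec_occupation_bureau_html (labo : List (String × String)) (out : List String) : Prop := out = occupation_bureau_html_alt labo
instance (labo : List (String × String)) (out : List String) : Decidable (Spec_occupation_bureau_html labo out) := by unfold Spec_occupation_bureau_html; infer_instance

-- ===== CLAIM (what is proved, stated in full; the proofs are below) =====
def Claim_equal_occupation_bureau_html : Prop := ∀ (labo : List (String × String)), Dom_occupation_bureau_html labo → Spec_occupation_bureau_html labo (occupation_bureau_html labo)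

-- ===== LEMMAS AND PROOFS =====

-- A's loop step (setdefault-to-[] then append) is the single 'modify' step.
theorem stepA_eq_modify (d : PySem.Dict String (List String)) (p : String × String) :
    (let d' := if d.contains p.2 then d else d.insert p.2 []
     d'.modify p.2 [] (fun l => l ++ [p.1])) = d.modify p.2 [] (fun l => l ++ [p.1]) := by
  by_cases h : d.contains p.2
  · simp [h]
  · simp only [h, Bool.false_eq_true, if_false]
    rw [PySem.Dict.modify, PySem.Dict.modify,
        PySem.Dict.getD_of_not_contains d [] (by simpa using h),
        PySem.Dict.getD_insert_self, PySem.Dict.insert_insert_self]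

-- The grouped dict's items: distinct offices in first-occurrence order, each with its filtered names.
theorem group_keys (xs : List (String × String)) :
    (xs.foldl (fun d p => d.modify p.2 [] (fun l => l ++ [p.1]))
        (PySem.Dict.empty : PySem.Dict String (List String))).keys
      = PySem.Set.ofList (xs.map (fun p => p.2)) := by
  have h := PySem.Dict.keys_foldl_modify_key xs (fun p => p.2) []
    (fun _ p l => l ++ [p.1]) (PySem.Dict.empty : PySem.Dict String (List String))
  rw [PySem.Dict.keys_empty, PySem.Set.update_nil_left] at h
  exact h

theorem group_nodup_keys (xs : List (String × String)) :
    (xs.foldl (fun d p => d.modify p.2 [] (fun l => l ++ [p.1]))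
        (PySem.Dict.empty : PySem.Dict String (List String))).keys.Nodup :=
  PySem.Dict.nodup_keys_foldl_modify_key xs (fun p => p.2) [] (fun _ p l => l ++ [p.1])
    PySem.Dict.empty PySem.Dict.nodup_keys_empty

theorem group_getD (xs : List (String × String)) (b : String) :
    (xs.foldl (fun d p => d.modify p.2 [] (fun l => l ++ [p.1]))
        (PySem.Dict.empty : PySem.Dict String (List String))).getD b []
      = (xs.filter (fun p => p.2 == b)).map (fun p => p.1) := by
  have h := PySem.Dict.getD_foldl_modify_append (xs.map (fun p => (p.2, p.1)))
    (PySem.Dict.empty : PySem.Dict String (List String)) b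
  rw [List.foldl_map] at h
  rw [PySem.Dict.getD_empty, List.filter_map, List.map_map] at h
  exact h.trans (by simp [Function.comp_def])

-- The grouped dict's items: distinct offices in first-occurrence order, each with its filtered names.
theorem group_items (xs : List (String × String)) :
    (xs.foldl (fun d p => d.modify p.2 [] (fun l => l ++ [p.1]))
        (PySem.Dict.empty : PySem.Dict String (List String))).items
      = (PySem.Set.ofList (xs.map (fun p => p.2))).map
          (fun b => (b, (xs.filter (fun p => p.2 == b)).map (fun p => p.1))) := by
  rw [PySem.Dict.items_eq_map_keys _ (group_nodup_keys xs) [], group_keys xs]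
  exact List.map_congr_left (fun b _ => by rw [group_getD xs b])

theorem sorted_group_items (xs : List (String × String)) :
    PySem.List.sorted
        ((PySem.Set.ofList (xs.map (fun p => p.2))).map
          (fun b => (b, (xs.filter (fun p => p.2 == b)).map (fun p => p.1))))
        (fun q => q.1)
      = (PySem.List.sorted (PySem.Set.ofList (xs.map (fun p => p.2))) (fun b => b)).map
          (fun b => (b, (xs.filter (fun p => p.2 == b)).map (fun p => p.1))) := by
  apply PySem.List.sorted_eq_of_perm_of_pairwise_lt
  · exact (PySem.List.sorted_perm _ _ _).map _
  · rw [List.pairwise_map]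
    simpa using PySem.List.sorted_ofList_pairwise_lt (xs.map (fun p => p.2))

theorem main_eq (labo : List (String × String)) :
    occupation_bureau_html labo = occupation_bureau_html_alt labo := by
  unfold occupation_bureau_html occupation_bureau_html_alt
  have hf : (fun (d : PySem.Dict String (List String)) (p : String × String) =>
        let d := if d.contains p.2 then d else d.insert p.2 []
        d.modify p.2 [] (fun l => l ++ [p.1]))
      = (fun d p => d.modify p.2 [] (fun l => l ++ [p.1])) := by
    funext d p; exact stepA_eq_modify d p
  rw [hf]
  simp only [group_items, sorted_group_items, PySem.Dict.values, List.foldl_map]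
  congr 1
  apply List.foldl_ext
  intro acc b _
  simp only [PySem.List.foldl_append_singleton_eq_map]
  simp [List.append_assoc]

-- ===== VERDICT (by name: the statement is the Claim_ definition above) =====
theorem occupation_bureau_html_spec : Claim_equal_occupation_bureau_html := by
  intro labo _
  unfold Spec_occupation_bureau_html
  exact main_eq labo
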